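-- pv_equiv track=rewrite | github.com/Lucack/Sistema-de-Backup-Distribuido | Gerenciador/manager.py | choose_sv
-- ===== SOURCE A (Python) =====
-- def choose_sv(carga):
--     principal = -1
--     replica = -1
--     #lembrar de fazer uma escolha pelo mínimo, e acessar o si correspondente no vetor de servidores
--     min_carga = float('inf')
--     for i in range(len(carga)):
--         if carga[i] < min_carga:
--             min_carga = carga[i]
--             principal = i
--
--     min_carga = float('inf')
--     for i in range(len(carga)):
--         if i == principal:
--             continue
--         if carga[i] < min_carga:
--             min_carga = carga[i]
--             replica = i
--
--     return principal, replica
-- ===== SOURCE B (Python) =====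
-- def choose_sv(carga):
--     idx1, min1 = -1, None
--     idx2, min2 = -1, None
--     for i, x in enumerate(carga):
--         if min1 is None or x < min1:
--             idx2, min2 = idx1, min1
--             idx1, min1 = i, x
--         elif min2 is None or x < min2:
--             idx2, min2 = i, x
--     return idx1, idx2
-- ===== Notes on version B (the rewrite author's own statement) =====
-- stated objective: alternative
-- what changed: Replaces A's two full passes (find the min, then rescan skipping its index for the second min) by a single pass that maintains the two smallest values with their indices, shifting the pair on a new minimum; strict '<' keeps first-occurrence tie-breaking and -1 sentinels survive for empty/singleton input.
import Mathlib
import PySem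

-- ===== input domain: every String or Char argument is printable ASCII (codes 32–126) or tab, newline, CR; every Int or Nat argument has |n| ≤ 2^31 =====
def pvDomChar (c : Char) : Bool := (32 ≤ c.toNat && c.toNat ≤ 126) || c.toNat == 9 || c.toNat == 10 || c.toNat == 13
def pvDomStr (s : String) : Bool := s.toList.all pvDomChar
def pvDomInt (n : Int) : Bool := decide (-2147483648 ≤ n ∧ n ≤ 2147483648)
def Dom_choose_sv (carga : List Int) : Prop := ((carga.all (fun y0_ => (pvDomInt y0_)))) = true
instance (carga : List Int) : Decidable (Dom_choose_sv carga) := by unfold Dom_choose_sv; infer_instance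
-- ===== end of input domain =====

-- B replaces A's two full passes by a single pass that maintains the two smallest
-- values with their indices (objective: alternative single-pass decomposition).

-- `x < m` where `m : Option Int` models Python's running minimum, `none` = float('inf')
-- (so the comparison is always true when the minimum is still infinity).
def pvLt (x : Int) (m : Option Int) : Bool := m.all (fun v => x < v)

-- ===== PORT A =====
-- first loop of A: running (principal, min_carga)
def pvStep1 (s : Int × Option Int) (e : Int × Nat) : Int × Option Int :=
  if pvLt e.1 s.2 then ((e.2 : Int), some e.1) else s

-- second loop of A: same update but `continue` when i == principal
def pvStep2 (p : Int) (s : Int × Option Int) (e : Int × Nat) : Int × Option Int :=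
  if (e.2 : Int) = p then s
  else if pvLt e.1 s.2 then ((e.2 : Int), some e.1) else s

def choose_sv (carga : List Int) : Int × Int :=
  let fstPass := (carga.zipIdx).foldl pvStep1 (-1, none)
  let sndPass := (carga.zipIdx).foldl (pvStep2 fstPass.1) (-1, none)
  (fstPass.1, sndPass.1)

-- ===== PORT B =====
-- single pass: state = ((idx1, min1), (idx2, min2)); on a new minimum the old best
-- is shifted into second place, otherwise only the second slot may be updated
def pvStepB (s : (Int × Option Int) × (Int × Option Int)) (e : Int × Nat) :
    (Int × Option Int) × (Int × Option Int) :=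
  if pvLt e.1 s.1.2 then (((e.2 : Int), some e.1), s.1)
  else if pvLt e.1 s.2.2 then (s.1, ((e.2 : Int), some e.1))
  else s

def choose_sv_alt (carga : List Int) : Int × Int :=
  let r := (carga.zipIdx).foldl pvStepB ((-1, none), (-1, none))
  (r.1.1, r.2.1)

-- ===== PRECONDITION & SPEC =====
def Spec_choose_sv (carga : List Int) (out : Int × Int) : Prop := out = choose_sv_alt carga
instance (carga : List Int) (out : Int × Int) : Decidable (Spec_choose_sv carga out) := by unfold Spec_choose_sv; infer_instance

-- ===== CLAIM (what is proved, stated in full; the proofs are below) =====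
def Claim_equal_choose_sv : Prop := ∀ (carga : List Int), Dom_choose_sv carga → Spec_choose_sv carga (choose_sv carga)

-- ===== LEMMAS AND PROOFS =====

-- A's second loop coincides with its first loop as long as the skipped index never occurs.
theorem foldl_step2_eq_step1 (q : Int) (l : List (Int × Nat)) (s : Int × Option Int)
    (h : ∀ e ∈ l, (e.2 : Int) ≠ q) :
    l.foldl (pvStep2 q) s = l.foldl pvStep1 s := by
  induction l generalizing s with
  | nil => rfl
  | cons e t ih =>
    simp only [List.foldl_cons]
    have h' : (e.2 : Int) ≠ q := h e List.mem_cons_self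
    rw [show pvStep2 q s e = pvStep1 s e by simp [pvStep2, pvStep1, h']]
    exact ih _ (fun e' he' => h e' (List.mem_cons_of_mem _ he'))

-- Main invariant: B's single-pass state is exactly (A's first-pass result,
-- A's second-pass result with the final principal), and the principal is
-- either untouched (-1, min none) or a genuine index of the list.
theorem pv_invariant (carga : List Int) :
    ((carga.zipIdx).foldl pvStepB ((-1, none), (-1, none)) =
      ((carga.zipIdx).foldl pvStep1 (-1, none),
       (carga.zipIdx).foldl (pvStep2 ((carga.zipIdx).foldl pvStep1 (-1, none)).1) (-1, none)))
    ∧ (((carga.zipIdx).foldl pvStep1 (-1, none)).2 = none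
       ∨ ∃ j, j < carga.length ∧ ((carga.zipIdx).foldl pvStep1 (-1, none)).1 = (j : Int)) := by
  induction carga using List.reverseRecOn with
  | nil => exact ⟨rfl, Or.inl rfl⟩
  | append_singleton ys x ih =>
    obtain ⟨hB, hP⟩ := ih
    have hzip : (ys ++ [x]).zipIdx = ys.zipIdx ++ [(x, ys.length)] := by
      simp [List.zipIdx_append]
    have hbound : ∀ e ∈ ys.zipIdx, (e.2 : Int) ≠ (ys.length : Int) := by
      rintro ⟨a, i⟩ hmem
      have := (List.mem_zipIdx hmem).2.1
      simp only [Nat.zero_add] at this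
      simpa using Nat.ne_of_lt this
    set A1 := (ys.zipIdx).foldl pvStep1 (-1, none) with hA1
    set A2 := (ys.zipIdx).foldl (pvStep2 A1.1) (-1, none) with hA2
    rw [hzip]
    simp only [List.foldl_append, List.foldl_cons, List.foldl_nil, ← hA1, hB]
    by_cases h1 : pvLt x A1.2 = true
    · -- new overall minimum: principal becomes the new index, second slot gets old best
      have hstep1 : pvStep1 A1 (x, ys.length) = ((ys.length : Int), some x) := by
        simp [pvStep1, h1]
      have hskip : ∀ s, pvStep2 ((ys.length : Int)) s (x, ys.length) = s := by
        intro s; simp [pvStep2]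
      constructor
      · rw [hstep1]
        rw [foldl_step2_eq_step1 _ _ _ hbound, hskip, ← hA1]
        simp [pvStepB, h1]
      · rw [hstep1]
        exact Or.inr ⟨ys.length, by simp, by norm_cast⟩
    · -- not a new minimum: principal unchanged, so skip never fires at the new index
      have hstep1 : pvStep1 A1 (x, ys.length) = A1 := by
        simp [pvStep1, h1]
      have hjdx : ∃ j, j < ys.length ∧ A1.1 = (j : Int) := by
        rcases hP with hnone | hj
        · exact absurd (by simp [pvLt, hnone]) h1
        · exact hj
      obtain ⟨j, hjlt, hj⟩ := hjdx
      have hnoskip : ¬ ((ys.length : Int) = A1.1) := by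
        rw [hj]; simpa using Nat.ne_of_lt' hjlt
      constructor
      · rw [hstep1]
        simp only [← hA2]
        by_cases h2 : pvLt x A2.2 = true
        · simp [pvStepB, pvStep2, h1, h2, hnoskip]
        · simp [pvStepB, pvStep2, h1, h2, hnoskip]
      · rw [hstep1]
        exact Or.inr ⟨j, by simp; omega, hj⟩

-- ===== VERDICT (by name: the statement is the Claim_ definition above) =====
theorem choose_sv_spec : Claim_equal_choose_sv := by
  intro carga _
  unfold Spec_choose_sv choose_sv choose_sv_alt
  rw [(pv_invariant carga).1]
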